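-- pv_equiv track=rewrite | github.com/cvelasquez94/ia-profile-xp | app.py | classify_activity
-- ===== SOURCE A (Python) =====
-- EXTREME_SPORTS = {
--     "Skydiving", "Bungee jumping", "Rock climbing", "Motocross", "Surfing", "Snowboarding",
--     "Skateboarding", "Ski", "Ski Equipment", "Winter sports"
-- }
--
-- def classify_activity(labels):
--     """Classifies activity based on detected labels and assigns a risk level."""
--     detected_activities = [label["description"] for label in labels]
--
--     # Check for extreme sports
--     extreme_detected = EXTREME_SPORTS.intersection(detected_activities)
--
--     if extreme_detected:
--         if "Ski" in detected_activities or "Snowboarding" in detected_activities: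
--             return "Extreme sport detected: Ski/Snowboarding", 7  # Moderate-high risk
--         return "Extreme sport detected", 9  # High risk
--     else:
--         return "Normal activity", 2  # Low risk
-- ===== SOURCE B (Python) =====
-- EXTREME_SPORTS = {
--     "Skydiving", "Bungee jumping", "Rock climbing", "Motocross", "Surfing", "Snowboarding",
--     "Skateboarding", "Ski", "Ski Equipment", "Winter sports"
-- }
--
-- RESULTS = [
--     ("Normal activity", 2),
--     ("Extreme sport detected", 9),
--     ("Extreme sport detected: Ski/Snowboarding", 7),
-- ]
--
-- def _rank(d):
--     if d in ("Ski", "Snowboarding"):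
--         return 2
--     if d in EXTREME_SPORTS:
--         return 1
--     return 0
--
-- def classify_activity(labels):
--     """Classifies activity based on detected labels and assigns a risk level."""
--     return RESULTS[max((_rank(label["description"]) for label in labels), default=0)]
-- ===== Notes on version B (the rewrite author's own statement) =====
-- stated objective: alternative
-- what changed: Replaces the description-list build, set intersection and final membership branches with a rank-and-reduce scheme: each label is mapped to a numeric severity (2 Ski/Snowboarding, 1 other extreme sport, 0 normal), a single max() reduction picks the highest severity, and a constant result table is indexed by it, eliminating all post-loop branching.
import Mathlib
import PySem

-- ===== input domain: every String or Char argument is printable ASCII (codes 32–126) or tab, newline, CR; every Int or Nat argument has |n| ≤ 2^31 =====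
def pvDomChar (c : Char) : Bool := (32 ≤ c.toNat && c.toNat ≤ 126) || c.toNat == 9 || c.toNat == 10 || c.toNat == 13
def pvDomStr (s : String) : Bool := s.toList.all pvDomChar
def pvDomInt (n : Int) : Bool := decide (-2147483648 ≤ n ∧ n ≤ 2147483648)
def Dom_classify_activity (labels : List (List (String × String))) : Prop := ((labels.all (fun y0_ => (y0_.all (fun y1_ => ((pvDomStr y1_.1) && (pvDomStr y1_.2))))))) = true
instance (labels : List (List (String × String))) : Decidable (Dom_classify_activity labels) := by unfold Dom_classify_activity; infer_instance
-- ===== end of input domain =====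

-- B replaces A's description-list build + set intersection + membership branches by a
-- rank-and-reduce scheme: max severity rank per label, indexed into a constant result table
-- (objective: alternative decomposition; same cost). No side effects involved.

-- ===== PORT A =====
-- the module constant EXTREME_SPORTS (a set literal; only membership is tested)
def extremeSports : List String :=
  ["Skydiving", "Bungee jumping", "Rock climbing", "Motocross", "Surfing", "Snowboarding",
   "Skateboarding", "Ski", "Ski Equipment", "Winter sports"]

-- label["description"]: first-match association-list lookup; KeyError (= none) is excluded by Pre_
def getDesc (l : List (String × String)) : String :=
  ((l.find? (fun p => p.1 == "description")).map (·.2)).getD ""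

def classify_activity (labels : List (List (String × String))) : String × Int :=
  let detected := labels.map getDesc
  let extreme_detected := extremeSports.filter (fun s => detected.contains s)
  if !extreme_detected.isEmpty then
    if detected.contains "Ski" || detected.contains "Snowboarding" then
      ("Extreme sport detected: Ski/Snowboarding", 7)
    else
      ("Extreme sport detected", 9)
  else
    ("Normal activity", 2)

-- ===== PORT B =====
-- the module constant RESULTS (indexed by severity rank)
def resultsTable : List (String × Int) :=
  [("Normal activity", 2),
   ("Extreme sport detected", 9),
   ("Extreme sport detected: Ski/Snowboarding", 7)]

-- _rank(d)
def rankOf (d : String) : Nat :=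
  if d == "Ski" || d == "Snowboarding" then 2
  else if extremeSports.contains d then 1
  else 0

def classify_activity_alt (labels : List (List (String × String))) : String × Int :=
  let m := labels.foldl (fun (acc : Nat) l => max acc (rankOf (getDesc l))) 0
  (PySem.List.pyGet? resultsTable (Int.ofNat m)).getD ("", 0)

-- ===== PRECONDITION & SPEC =====
-- Pre_ excludes exactly the inputs where some label lacks a "description" key: there the
-- Python A raises KeyError (B raises the same KeyError at the same label).
def Pre_classify_activity (labels : List (List (String × String))) : Prop :=
  (labels.all (fun l => l.any (fun p => p.1 == "description"))) = true
instance (labels : List (List (String × String))) : Decidable (Pre_classify_activity labels) := by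
  unfold Pre_classify_activity; infer_instance

def pvWitness_classify_activity : (List (List (String × String))) :=
  [[("description", "Ski")], [("description", "Reading")]]

def Spec_classify_activity (labels : List (List (String × String))) (out : String × Int) : Prop := out = classify_activity_alt labels
instance (labels : List (List (String × String))) (out : String × Int) : Decidable (Spec_classify_activity labels out) := by unfold Spec_classify_activity; infer_instance

-- ===== CLAIM (what is proved, stated in full; the proofs are below) =====
def Claim_equal_classify_activity : Prop := ∀ (labels : List (List (String × String))), Dom_classify_activity labels → Pre_classify_activity labels → Spec_classify_activity labels (classify_activity labels)

-- ===== LEMMAS AND PROOFS =====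

-- the boolean-pair encoding of a rank: 2 if ski/snow, 1 if extreme, else 0
def rankEnc (ext ski : Bool) : Nat := if ski then 2 else if ext then 1 else 0

theorem max_rankEnc (a b c d : Bool) :
    max (rankEnc a b) (rankEnc c d) = rankEnc (a || c) (b || d) := by
  cases a <;> cases b <;> cases c <;> cases d <;> decide

theorem rankOf_eq_enc (s : String) :
    rankOf s = rankEnc (extremeSports.contains s) (s == "Ski" || s == "Snowboarding") := by
  unfold rankOf rankEnc
  rcases h : (s == "Ski" || s == "Snowboarding") with _ | _
  · simp
  · have : extremeSports.contains s = true := by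
      rcases Bool.or_eq_true_iff.mp h with h' | h' <;>
        · rw [beq_iff_eq] at h'; subst h'; decide
    simp

-- B's fold computes the rank encoded by "any extreme" / "any Ski or Snowboarding"
theorem fold_char (labels : List (List (String × String))) (a : Nat)
    (e s : Bool) (ha : a = rankEnc e s) :
    labels.foldl (fun (acc : Nat) l => max acc (rankOf (getDesc l))) a
      = rankEnc (e || (labels.map getDesc).any (fun d => extremeSports.contains d))
                (s || (labels.map getDesc).any (fun d => d == "Ski" || d == "Snowboarding")) := by
  induction labels generalizing a e s with
  | nil => simpa using ha
  | cons h t ih =>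
    rw [List.foldl_cons]
    rw [ih (max a (rankOf (getDesc h)))
        (e || extremeSports.contains (getDesc h))
        (s || (getDesc h == "Ski" || getDesc h == "Snowboarding"))
        (by rw [ha, rankOf_eq_enc, max_rankEnc])]
    simp [Bool.or_assoc]

theorem ski_imp_extreme (ds : List String)
    (h : ds.any (fun d => d == "Ski" || d == "Snowboarding") = true) :
    ds.any (fun d => extremeSports.contains d) = true := by
  simp only [List.any_eq_true] at h ⊢
  obtain ⟨d, hd, hp⟩ := h
  refine ⟨d, hd, ?_⟩
  rcases Bool.or_eq_true_iff.mp hp with h' | h' <;>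
    · rw [beq_iff_eq] at h'; subst h'; decide

theorem filter_nonempty_iff_any (ds : List String) :
    (!(extremeSports.filter (fun s => ds.contains s)).isEmpty)
      = ds.any (fun d => extremeSports.contains d) := by
  rcases hb : ds.any (fun d => extremeSports.contains d) with _ | _
  · simp only [List.any_eq_false] at hb
    simp only [Bool.not_eq_eq_eq_not, Bool.not_false, List.isEmpty_iff,
      List.filter_eq_nil_iff]
    intro s hs hc
    simp only [List.contains_eq_mem, decide_eq_true_eq] at hc
    have := hb s hc
    simp [List.contains_eq_mem, hs] at this
  · simp only [List.any_eq_true] at hb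
    obtain ⟨d, hd, hc⟩ := hb
    simp only [List.contains_eq_mem, decide_eq_true_eq] at hc
    have hmem : d ∈ extremeSports.filter (fun s => ds.contains s) := by
      simp [List.mem_filter, hc, List.contains_eq_mem, hd]
    rcases hfe : extremeSports.filter (fun s => ds.contains s) with _ | ⟨x, xs⟩
    · rw [hfe] at hmem; simp at hmem
    · rfl

theorem any_ski_eq_contains (ds : List String) :
    ds.any (fun d => d == "Ski" || d == "Snowboarding")
      = (ds.contains "Ski" || ds.contains "Snowboarding") := by
  rw [Bool.eq_iff_iff]
  simp only [List.any_eq_true, Bool.or_eq_true, beq_iff_eq, List.contains_eq_mem,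
    decide_eq_true_eq]
  constructor
  · rintro ⟨d, hd, rfl | rfl⟩
    · exact Or.inl hd
    · exact Or.inr hd
  · rintro (h | h)
    · exact ⟨_, h, Or.inl rfl⟩
    · exact ⟨_, h, Or.inr rfl⟩

-- ===== VERDICT (by name: the statement is the Claim_ definition above) =====
theorem classify_activity_spec : Claim_equal_classify_activity := by
  intro labels _ _
  unfold Spec_classify_activity classify_activity classify_activity_alt
  rw [fold_char labels 0 false false rfl]
  simp only [Bool.false_or]
  set ds := labels.map getDesc with hds
  rw [filter_nonempty_iff_any]
  rcases he : ds.any (fun d => extremeSports.contains d) with _ | _ <;>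
    rcases hy : ds.any (fun d => d == "Ski" || d == "Snowboarding") with _ | _
  · simp [rankEnc, PySem.List.pyGet?, PySem.List.pyIdx?, resultsTable]
  · have h' := ski_imp_extreme ds hy
    rw [he] at h'; exact absurd h' (by simp)
  · rw [any_ski_eq_contains] at hy
    simp only [Bool.or_eq_false_iff, List.contains_eq_mem, decide_eq_false_iff_not] at hy
    simp [rankEnc, hy.1, hy.2, PySem.List.pyGet?, PySem.List.pyIdx?, resultsTable]
  · rw [any_ski_eq_contains] at hy
    simp only [Bool.or_eq_true, List.contains_eq_mem, decide_eq_true_eq] at hy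
    simp [rankEnc, hy, PySem.List.pyGet?, PySem.List.pyIdx?, resultsTable]
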